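-- pv_equiv track=rewrite | github.com/JeangyuHeo/Algorithm | 연습문제/SK_4.py | solution
-- ===== SOURCE A (Python) =====
-- from collections import defaultdict
--
-- def solution(n, edges):
--     answer = 0
--     length = len(edges)
--     dic = defaultdict(int)
--
--     for start, end in edges:
--         dic[start] += 1
--     count = 0
--     for key, val in dic.items():
--         if val > 1:
--             count+=1
--
--     return length**2 if count >=2 else length**2 - 1
-- ===== SOURCE B (Python) =====
-- def solution(n, edges):
--     starts = sorted(s for s, _ in edges)
--     count = 0
--     prev = None
--     run = 0
--     for s in starts:
--         if s == prev:
--             run += 1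
--             if run == 2:
--                 count += 1
--         else:
--             prev = s
--             run = 1
--     length = len(edges)
--     return length ** 2 if count >= 2 else length ** 2 - 1
-- ===== Notes on version B (the rewrite author's own statement) =====
-- stated objective: alternative
-- what changed: Replaced A's counting dict plus a second pass over its items with sort-then-scan: sort the start values and count runs of length >= 2 in one linear scan over the sorted list.
import Mathlib
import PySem

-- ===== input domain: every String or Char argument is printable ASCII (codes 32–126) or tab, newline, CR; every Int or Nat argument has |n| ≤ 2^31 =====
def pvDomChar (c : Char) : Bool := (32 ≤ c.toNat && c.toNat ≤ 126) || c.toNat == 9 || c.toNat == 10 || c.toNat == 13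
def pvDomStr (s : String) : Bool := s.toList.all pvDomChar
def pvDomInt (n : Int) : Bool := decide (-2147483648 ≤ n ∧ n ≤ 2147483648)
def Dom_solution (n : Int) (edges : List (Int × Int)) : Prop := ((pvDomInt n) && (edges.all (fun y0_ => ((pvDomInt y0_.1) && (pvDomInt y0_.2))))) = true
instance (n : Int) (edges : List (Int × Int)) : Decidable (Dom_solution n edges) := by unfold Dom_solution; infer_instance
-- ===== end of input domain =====

-- B replaces A's counting dict plus second items-pass with sort-then-scan: sort the
-- start values and count runs of length >= 2 in one linear scan; same return value.


-- ===== PORT A =====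
def solution (n : Int) (edges : List (Int × Int)) : Int :=
  let length : Int := edges.length
  let dic : PySem.Dict Int Int :=
    edges.foldl (fun dic p => dic.modify p.1 0 (· + 1)) PySem.Dict.empty
  let count : Int :=
    dic.items.foldl (fun count kv => if kv.2 > 1 then count + 1 else count) 0
  if count ≥ 2 then length ^ 2 else length ^ 2 - 1

-- ===== PORT B =====
-- sorted(s for s, _ in edges); then one scan keeping (count, prev, run);
-- 's == prev' with prev = None is False for ints, hence prev : Option Int and 'some s = prev'.
def solution_alt (n : Int) (edges : List (Int × Int)) : Int :=
  let starts := PySem.List.sorted (edges.map (fun p => p.1)) (fun x => x) false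
  let st : Int × Option Int × Int :=
    starts.foldl
      (fun st s =>
        if some s = st.2.1 then
          let run := st.2.2 + 1
          (if run = 2 then st.1 + 1 else st.1, st.2.1, run)
        else (st.1, some s, 1))
      (0, none, 0)
  let length : Int := edges.length
  if st.1 ≥ 2 then length ^ 2 else length ^ 2 - 1

-- ===== PRECONDITION & SPEC =====
def Spec_solution (n : Int) (edges : List (Int × Int)) (out : Int) : Prop := out = solution_alt n edges
instance (n : Int) (edges : List (Int × Int)) (out : Int) : Decidable (Spec_solution n edges out) := by unfold Spec_solution; infer_instance

-- ===== CLAIM =====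
def Claim_equal_solution : Prop := ∀ (n : Int) (edges : List (Int × Int)), Dom_solution n edges → Spec_solution n edges (solution n edges)

-- ===== LEMMAS AND PROOFS =====

-- the number of distinct values occurring more than once in l
def pvN (l : List Int) : Nat :=
  (PySem.Set.ofList l).countP (fun k => decide (1 < l.count k))

-- B's loop body, named for the proofs (definitionally the lambda in solution_alt)
def pvStepL (st : Int × Option Int × Int) (s : Int) : Int × Option Int × Int :=
  if some s = st.2.1 then
    let run := st.2.2 + 1
    (if run = 2 then st.1 + 1 else st.1, st.2.1, run)
  else (st.1, some s, 1)

theorem pvN_nil : pvN [] = 0 := by decide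

-- A-side: the dict fold and items fold compute pvN of the starts
theorem pv_countA (edges : List (Int × Int)) :
    (edges.foldl (fun dic p => dic.modify p.1 0 (· + 1))
        (PySem.Dict.empty : PySem.Dict Int Int)).items.foldl
      (fun count kv => if kv.2 > 1 then count + 1 else count) (0 : Int)
    = (pvN (edges.map Prod.fst) : Int) := by
  have h1 : edges.foldl (fun dic p => dic.modify p.1 0 (· + 1))
      (PySem.Dict.empty : PySem.Dict Int Int)
      = PySem.Dict.counter (edges.map Prod.fst) := by
    rw [PySem.Dict.counter_eq_foldl, List.foldl_map]
  rw [h1, PySem.Dict.items_counter, PySem.List.foldl_ite_add_one, zero_add]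
  rw [List.countP_map, pvN]
  congr 1
  apply List.countP_congr
  intro k _
  rw [Bool.eq_iff_iff]
  simp only [Function.comp_apply, decide_eq_true_eq, gt_iff_lt, iff_true]
  exact Nat.one_lt_cast

-- pvN is invariant under permutation
theorem pv_pvN_perm (l l' : List Int) (h : l.Perm l') : pvN l = pvN l' := by
  unfold pvN
  have h1 : (PySem.Set.ofList l).Perm (PySem.Set.ofList l') := by
    rw [List.perm_ext_iff_of_nodup (PySem.Set.nodup_ofList l) (PySem.Set.nodup_ofList l')]
    intro a
    rw [PySem.Set.mem_ofList, PySem.Set.mem_ofList]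
    exact h.mem_iff
  rw [h1.countP_eq]
  apply List.countP_congr
  intro k _
  rw [h.count_eq]

-- on a sorted tail bounded below by a, everything after the leading a-run exceeds a
theorem pv_drop_gt (tl : List Int) (a : Int) (hs : tl.Pairwise (· ≤ ·))
    (hb : ∀ x ∈ tl, a ≤ x) : ∀ x ∈ tl.dropWhile (· == a), a < x := by
  induction tl with
  | nil => simp
  | cons b bs ih =>
    rw [List.dropWhile_cons]
    by_cases hba : b = a
    · subst hba
      simp only [beq_self_eq_true, if_true]
      exact ih hs.of_cons (fun x hx => hb x (List.mem_cons_of_mem _ hx))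
    · rw [if_neg (by simpa using hba)]
      intro x hx
      rcases List.mem_cons.mp hx with rfl | hxs
      · exact lt_of_le_of_ne (hb _ (List.mem_cons_self ..)) (Ne.symm hba)
      · have hbx : b ≤ x := (List.pairwise_cons.mp hs).1 x hxs
        have hab : a < b := lt_of_le_of_ne (hb b (List.mem_cons_self ..)) (Ne.symm hba)
        omega

-- scanning a run of a's with run counter already ≥ 2 changes nothing but the counter
theorem pv_rep2 (a : Int) (k : Nat) (c r : Int) (hr : 2 ≤ r) :
    (List.replicate k a).foldl pvStepL (c, some a, r) = (c, some a, r + k) := by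
  induction k generalizing r with
  | zero => simp
  | succ m ih =>
    rw [List.replicate_succ, List.foldl_cons]
    have hstep : pvStepL (c, some a, r) a = (c, some a, r + 1) := by
      show (if some a = some a then ((if r + 1 = 2 then c + 1 else c), some a, r + 1)
          else (c, some a, 1)) = (c, some a, r + 1)
      rw [if_pos rfl, if_neg (by omega)]
    rw [hstep, ih (r + 1) (by omega)]
    refine congrArg₂ Prod.mk rfl (congrArg₂ Prod.mk rfl ?_)
    push_cast; ring

-- scanning a run of a's from run = 1 bumps count iff the run extends
theorem pv_rep1 (a : Int) (k : Nat) (c : Int) :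
    (List.replicate k a).foldl pvStepL (c, some a, 1)
      = (c + (if 1 ≤ k then (1 : Int) else 0), some a, 1 + (k : Int)) := by
  cases k with
  | zero => simp
  | succ m =>
    rw [List.replicate_succ, List.foldl_cons]
    have hstep : pvStepL (c, some a, 1) a = (c + 1, some a, 2) := by
      show (if some a = some a then ((if (1 : Int) + 1 = 2 then c + 1 else c), some a, (1 : Int) + 1)
          else (c, some a, 1)) = (c + 1, some a, 2)
      rw [if_pos rfl, if_pos (by norm_num)]
      norm_num
    rw [hstep, pv_rep2 a m (c + 1) 2 (by omega)]
    refine congrArg₂ Prod.mk ?_ (congrArg₂ Prod.mk rfl ?_)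
    · rw [if_pos (by omega : 1 ≤ m + 1)]
    · push_cast; ring

-- main B-side invariant: on a sorted list strictly above the remembered value,
-- the scan adds pvN of the list to the count
theorem pv_loopB (N : Nat) : ∀ (l : List Int), l.length ≤ N → l.Pairwise (· ≤ ·) →
    ∀ (c : Int) (p : Option Int) (r : Int), (∀ b, p = some b → ∀ x ∈ l, b < x) →
    (l.foldl pvStepL (c, p, r)).1 = c + (pvN l : Int) := by
  induction N with
  | zero =>
    intro l hl _ c p r _
    cases l with
    | nil => simp [pvN_nil]
    | cons a tl => simp at hl
  | succ N ih =>
    intro l hl hs c p r hp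
    cases l with
    | nil => simp [pvN_nil]
    | cons a tl =>
      have hble : ∀ x ∈ tl, a ≤ x := (List.pairwise_cons.mp hs).1
      have hstl : tl.Pairwise (· ≤ ·) := (List.pairwise_cons.mp hs).2
      set t := tl.takeWhile (· == a) with ht_def
      set d := tl.dropWhile (· == a) with hd_def
      have htl : tl = t ++ d := (List.takeWhile_append_dropWhile).symm
      have hta : ∀ x ∈ t, x = a := fun x hx => by
        simpa using List.mem_takeWhile_imp hx
      have htrep : t = List.replicate t.length a :=
        List.eq_replicate_iff.mpr ⟨rfl, hta⟩
      have hdgt : ∀ x ∈ d, a < x := pv_drop_gt tl a hstl hble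
      have hsd : d.Pairwise (· ≤ ·) := hstl.sublist (List.dropWhile_sublist _)
      have hdlen : d.length ≤ N := by
        have h2 := congrArg List.length htl
        simp only [List.length_append] at h2
        simp only [List.length_cons] at hl
        omega
      have hda : a ∉ d := fun h => lt_irrefl a (hdgt a h)
      have hcta : t.count a = t.length := by rw [htrep]; simp
      have hcount_a : (a :: tl).count a = t.length + 1 := by
        rw [htl, List.count_cons_self, List.count_append, hcta,
          List.count_eq_zero.mpr hda]
      have hcount_ne : ∀ x, x ≠ a → (a :: tl).count x = d.count x := by
        intro x hxa
        rw [List.count_cons_of_ne (Ne.symm hxa)]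
        rw [htl, List.count_append]
        have ht0 : t.count x = 0 := by
          rw [htrep, List.count_replicate]
          split_ifs with h
          · simp only [beq_iff_eq] at h; omega
          · rfl
        omega
      have hmem : ∀ x, x ∈ (a :: tl) ↔ (x = a ∨ x ∈ d) := by
        intro x
        constructor
        · intro hx
          rcases List.mem_cons.mp hx with rfl | hx
          · exact Or.inl rfl
          · rw [htl] at hx
            rcases List.mem_append.mp hx with hx | hx
            · exact Or.inl (hta x hx)
            · exact Or.inr hx
        · rintro (rfl | hx)
          · exact List.mem_cons_self ..
          · exact List.mem_cons_of_mem _ (by rw [htl]; exact List.mem_append_right _ hx)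
      have hperm : (PySem.Set.ofList (a :: tl)).Perm (a :: PySem.Set.ofList d) := by
        rw [List.perm_ext_iff_of_nodup (PySem.Set.nodup_ofList _)
          (List.nodup_cons.mpr ⟨fun h => hda ((PySem.Set.mem_ofList _ _).mp h),
            PySem.Set.nodup_ofList _⟩)]
        intro x
        rw [PySem.Set.mem_ofList, hmem x, List.mem_cons, PySem.Set.mem_ofList]
      have hpvN : pvN (a :: tl)
          = (if 1 ≤ t.length then 1 else 0) + pvN d := by
        rw [pvN, hperm.countP_eq, List.countP_cons]
        have hc1 : (PySem.Set.ofList d).countP (fun k => decide (1 < (a :: tl).count k))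
            = pvN d := by
          apply List.countP_congr
          intro k hk
          have hkd : k ∈ d := (PySem.Set.mem_ofList _ _).mp hk
          rw [hcount_ne k (fun h => hda (h ▸ hkd))]
        rw [hc1, hcount_a]
        simp only [decide_eq_true_eq]
        split_ifs with h1 h2 h3 <;> omega
      have hne : ¬ (some a = p) := by
        cases p with
        | none => simp
        | some b =>
          have hb : b < a := hp b rfl a (List.mem_cons_self ..)
          simp only [Option.some.injEq]
          omega
      have hstep0 : pvStepL (c, p, r) a = (c, some a, 1) := by
        show (if some a = p then ((if r + 1 = 2 then c + 1 else c), p, r + 1)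
            else (c, some a, 1)) = (c, some a, 1)
        rw [if_neg hne]
      rw [List.foldl_cons, hstep0]
      conv_lhs => rw [htl, htrep]
      rw [List.foldl_append, pv_rep1]
      rw [ih d hdlen hsd (c + (if 1 ≤ t.length then (1 : Int) else 0)) (some a)
        (1 + (t.length : Int))
        (fun b hb x hx => by injection hb with hb; exact hb ▸ hdgt x hx)]
      rw [hpvN]
      push_cast
      split_ifs <;> ring

-- ===== VERDICT =====
theorem solution_spec : Claim_equal_solution := by
  intro n edges _
  show solution n edges = solution_alt n edges
  show (if (edges.foldl (fun dic p => dic.modify p.1 0 (· + 1))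
        (PySem.Dict.empty : PySem.Dict Int Int)).items.foldl
        (fun count kv => if kv.2 > 1 then count + 1 else count) (0 : Int) ≥ 2
      then ((edges.length : Int)) ^ 2 else ((edges.length : Int)) ^ 2 - 1)
    = (if ((PySem.List.sorted (edges.map (fun p => p.1)) (fun x => x) false).foldl
        pvStepL (0, none, 0)).1 ≥ 2
      then ((edges.length : Int)) ^ 2 else ((edges.length : Int)) ^ 2 - 1)
  have hsorted : (PySem.List.sorted (edges.map (fun p => p.1)) (fun x => x) false).Pairwise
      (· ≤ ·) := by
    simpa using PySem.List.sorted_pairwise (edges.map (fun p => p.1)) (fun x => x)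
  have hB := pv_loopB (PySem.List.sorted (edges.map (fun p => p.1)) (fun x => x) false).length
    (PySem.List.sorted (edges.map (fun p => p.1)) (fun x => x) false) le_rfl hsorted
    0 none 0 (fun b hb => nomatch hb)
  have hperm : (PySem.List.sorted (edges.map (fun p => p.1)) (fun x => x) false).Perm
      (edges.map Prod.fst) := PySem.List.sorted_perm _ _ _
  rw [pv_countA, hB, zero_add, pv_pvN_perm _ _ hperm]
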